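-- pv_equiv track=rewrite | github.com/jereneal20/TIL | ps/largest-triple-products.py | findMaxProduct
-- ===== SOURCE A (Python) =====
-- import heapq
--
-- def findMaxProduct(arr):
--     if len(arr) < 3:
--         return [-1] * len(arr)
--     if len(arr) == 3:
--         return [-1, -1, arr[0] * arr[1] * arr[2]]
--
--     heap = []
--     heapq.heappush(heap, arr[0])
--     heapq.heappush(heap, arr[1])
--     heapq.heappush(heap, arr[2])
--     res = [-1, -1, heap[0] * heap[1] * heap[2]]
--     for val in arr[3:]:
--         if heap[0] < val:
--             heapq.heappop(heap)
--             heapq.heappush(heap, val)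
--
--         res.append(heap[0] * heap[1] * heap[2])
--
--     return res
-- ===== SOURCE B (Python) =====
-- def findMaxProduct(arr):
--     # Keep ALL values seen so far in one descending insertion-sorted list;
--     # the answer at each step is the product of its first three entries.
--     seen = []
--     res = []
--     for val in arr:
--         i = 0
--         while i < len(seen) and seen[i] >= val:
--             i += 1
--         seen.insert(i, val)
--         res.append(seen[0] * seen[1] * seen[2] if len(seen) >= 3 else -1)
--     return res
-- ===== Notes on version B (the rewrite author's own statement) =====
-- stated objective: alternative
-- what changed: Instead of a constant-size heap with eviction, B keeps every value seen so far in one descending insertion-sorted list and reads the product of its first three entries, in a single uniform loop with no seed phase and no len<3/len==3 special cases; it trades memory and O(n^2) worst-case insertion cost for that uniformity.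
import Mathlib
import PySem

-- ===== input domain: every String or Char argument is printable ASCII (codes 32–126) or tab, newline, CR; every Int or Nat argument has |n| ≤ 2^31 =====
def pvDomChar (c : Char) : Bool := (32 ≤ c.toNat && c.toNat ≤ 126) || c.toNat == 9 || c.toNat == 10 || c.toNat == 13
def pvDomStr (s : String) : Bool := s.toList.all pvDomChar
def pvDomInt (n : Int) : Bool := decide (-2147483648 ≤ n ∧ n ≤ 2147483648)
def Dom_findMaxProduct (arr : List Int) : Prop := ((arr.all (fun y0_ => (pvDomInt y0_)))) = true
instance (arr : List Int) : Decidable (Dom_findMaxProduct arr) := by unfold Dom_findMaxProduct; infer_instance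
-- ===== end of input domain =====

-- B replaces A's constant-size heapq heap by one descending insertion-sorted list of everything
-- seen so far (a genuinely different data structure; same return values, no argument mutation).

-- ===== PORT A =====
-- hand port of CPython heapq._siftdown (exact: pure-Python reference implementation, int heaps)
def pvSiftdown (heap : List Int) (startpos pos : Nat) (newitem : Int) : List Int :=
  if _h : startpos < pos then
    let parentpos := (pos - 1) / 2
    let parent := heap.getD parentpos 0
    if newitem < parent then pvSiftdown (heap.set pos parent) startpos parentpos newitem
    else heap.set pos newitem
  else heap.set pos newitem
termination_by pos
decreasing_by omega

-- hand port of heapq.heappush (append then siftdown from the new last position)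
def pvHeappush (heap : List Int) (item : Int) : List Int :=
  pvSiftdown (heap ++ [item]) 0 heap.length item

-- hand port of the loop of CPython heapq._siftup followed by its final _siftdown call
def pvSiftupLoop (heap : List Int) (pos : Nat) (newitem : Int) : List Int :=
  if _h : 2 * pos + 1 < heap.length then
    let childpos := 2 * pos + 1
    let childpos := if childpos + 1 < heap.length ∧ ¬ (heap.getD childpos 0 < heap.getD (childpos + 1) 0)
                    then childpos + 1 else childpos
    pvSiftupLoop (heap.set pos (heap.getD childpos 0)) childpos newitem
  else pvSiftdown (heap.set pos newitem) 0 pos newitem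
termination_by heap.length - pos
decreasing_by simp only [List.length_set]; split <;> omega

-- hand port of heapq.heappop, returning the new heap (A discards the popped value)
def pvHeappop (heap : List Int) : List Int :=
  let lastelt := heap.getD (heap.length - 1) 0
  let rest := heap.dropLast
  if rest.isEmpty then [] else pvSiftupLoop (rest.set 0 lastelt) 0 lastelt

-- loop body of A (state: (heap, res)); indices arr[0..2] are in range (length ≥ 3), so getD is exact
def pvStepA (st : List Int × List Int) (val : Int) : List Int × List Int :=
  let heap := if st.1.getD 0 0 < val then pvHeappush (pvHeappop st.1) val else st.1
  (heap, st.2 ++ [heap.getD 0 0 * heap.getD 1 0 * heap.getD 2 0])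

def findMaxProduct (arr : List Int) : List Int :=
  if arr.length < 3 then List.replicate arr.length (-1)
  else if arr.length = 3 then [-1, -1, arr.getD 0 0 * arr.getD 1 0 * arr.getD 2 0]
  else
    let heap := pvHeappush (pvHeappush (pvHeappush [] (arr.getD 0 0)) (arr.getD 1 0)) (arr.getD 2 0)
    let res := [-1, -1, heap.getD 0 0 * heap.getD 1 0 * heap.getD 2 0]
    ((arr.drop 3).foldl pvStepA (heap, res)).2

-- ===== PORT B =====
-- hand port of Source B's "scan i past every seen[i] >= val, then seen.insert(i, val)":
-- structural recursion over the descending list is exactly that index scan + insert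
def pvInsertDesc (seen : List Int) (val : Int) : List Int :=
  match seen with
  | [] => [val]
  | h :: t => if val ≤ h then h :: pvInsertDesc t val else val :: h :: t

-- loop body of B (state: (seen, res))
def pvStepB (st : List Int × List Int) (val : Int) : List Int × List Int :=
  let s := pvInsertDesc st.1 val
  (s, st.2 ++ [if 3 ≤ s.length then s.getD 0 0 * s.getD 1 0 * s.getD 2 0 else -1])

def findMaxProduct_alt (arr : List Int) : List Int :=
  (arr.foldl pvStepB ([], [])).2

-- ===== PRECONDITION & SPEC =====
def Spec_findMaxProduct (arr : List Int) (out : List Int) : Prop := out = findMaxProduct_alt arr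
instance (arr : List Int) (out : List Int) : Decidable (Spec_findMaxProduct arr out) := by unfold Spec_findMaxProduct; infer_instance

-- ===== CLAIM (what is proved, stated in full; the proofs are below) =====
def Claim_equal_findMaxProduct : Prop := ∀ (arr : List Int), Dom_findMaxProduct arr → Spec_findMaxProduct arr (findMaxProduct arr)

-- ===== LEMMAS AND PROOFS =====

lemma push0 (a : Int) : pvHeappush [] a = [a] := by
  simp [pvHeappush, pvSiftdown]

lemma push1 (a b : Int) : pvHeappush [a] b = if b < a then [b, a] else [a, b] := by
  unfold pvHeappush pvSiftdown
  split_ifs with h1 h2 <;> simp_all [pvSiftdown, List.set]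

lemma push2 (u v w : Int) :
    pvHeappush [u, v] w = if w < u then [w, v, u] else [u, v, w] := by
  unfold pvHeappush pvSiftdown
  split_ifs with h1 h2 <;> simp_all [pvSiftdown, List.set] <;> omega

lemma pop3 (p q r : Int) : pvHeappop [p, q, r] = if r < q then [r, q] else [q, r] := by
  unfold pvHeappop pvSiftupLoop
  norm_num [List.set, List.getD, List.dropLast]
  unfold pvSiftupLoop pvSiftdown
  split_ifs <;> simp_all [pvSiftdown, List.set, List.getD] <;> omega

lemma mem_insertDesc {a v : Int} {l : List Int} (h : a ∈ pvInsertDesc l v) : a = v ∨ a ∈ l := by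
  induction l with
  | nil => simpa [pvInsertDesc] using h
  | cons hd t ih =>
    by_cases hc : v ≤ hd
    · rcases (by simpa [pvInsertDesc, hc] using h : a = hd ∨ a ∈ pvInsertDesc t v) with h1 | h1
      · exact Or.inr (by simp [h1])
      · rcases ih h1 with h2 | h2
        · exact Or.inl h2
        · exact Or.inr (by simp [h2])
    · rcases (by simpa [pvInsertDesc, hc] using h) with h1 | h1 | h1
      · exact Or.inl h1
      · exact Or.inr (by simp [h1])
      · exact Or.inr (by simp [h1])

-- main invariant: A's heap holds {x,y,z} (x ≤ y ≤ z) in one of its two 3-heap shapes,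
-- B's seen list is z :: y :: x :: rest with everything in rest ≤ x
lemma fold_eq (l : List Int) (heap : List Int) (x y z : Int) (rest res : List Int)
    (hperm : heap = [x, y, z] ∨ heap = [x, z, y]) (hxy : x ≤ y) (hyz : y ≤ z)
    (hrest : ∀ a ∈ rest, a ≤ x) :
    (l.foldl pvStepA (heap, res)).2 = (l.foldl pvStepB (z :: y :: x :: rest, res)).2 := by
  induction l generalizing heap x y z rest res with
  | nil => rfl
  | cons val l ih =>
    have hget : heap.getD 0 0 = x := by rcases hperm with h | h <;> simp [h, List.getD]
    have hpop : pvHeappop heap = [y, z] := by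
      rcases hperm with h | h <;> rw [h, pop3]
      · simp [show ¬ z < y by omega]
      · split_ifs with h2
        · rfl
        · have : y = z := by omega
          simp [this]
    simp only [List.foldl]
    by_cases hlt : x < val
    · have hrx : ∀ a ∈ x :: rest, a ≤ x := by
        intro a ha
        rw [List.mem_cons] at ha
        rcases ha with rfl | ha
        · exact le_rfl
        · exact hrest a ha
      have hA : pvStepA (heap, res) val
          = (pvHeappush [y, z] val,
             res ++ [(pvHeappush [y, z] val).getD 0 0 * (pvHeappush [y, z] val).getD 1 0
                      * (pvHeappush [y, z] val).getD 2 0]) := by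
        simp only [pvStepA, hget, hpop, if_pos hlt]
      rw [hA, push2]
      by_cases hvz : val ≤ z
      · by_cases hvy : val ≤ y
        · -- new triple (val, y, z), seen becomes z :: y :: val :: x :: rest
          have hB : pvStepB (z :: y :: x :: rest, res) val
              = (z :: y :: val :: x :: rest, res ++ [z * y * val]) := by
            simp [pvStepB, pvInsertDesc, hvz, hvy, show ¬ val ≤ x by omega, List.getD]
          rw [hB]
          have hr : ∀ a ∈ x :: rest, a ≤ val := fun a ha => le_trans (hrx a ha) (by omega)
          by_cases hvy' : val < y
          · rw [if_pos hvy']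
            simp only [List.getD, List.getElem?_cons_zero, List.getElem?_cons_succ,
              Option.getD_some]
            rw [show val * z * y = z * y * val by ring]
            exact ih _ _ _ _ _ _ (Or.inr rfl) hvy hyz hr
          · have hey : val = y := by omega
            rw [if_neg (by omega)]
            simp only [List.getD, List.getElem?_cons_zero, List.getElem?_cons_succ,
              Option.getD_some]
            rw [show y * z * val = z * y * val by ring, hey]
            exact ih _ _ _ _ _ _ (Or.inr rfl) le_rfl hyz (hey ▸ hr)
        · -- y < val ≤ z: new triple (y, val, z), seen becomes z :: val :: y :: x :: rest
          have hB : pvStepB (z :: y :: x :: rest, res) val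
              = (z :: val :: y :: x :: rest, res ++ [z * val * y]) := by
            simp [pvStepB, pvInsertDesc, hvz, hvy, List.getD]
          rw [hB, if_neg (by omega)]
          simp only [List.getD, List.getElem?_cons_zero, List.getElem?_cons_succ,
            Option.getD_some]
          rw [show y * z * val = z * val * y by ring]
          exact ih _ _ _ _ _ _ (Or.inr rfl) (by omega) hvz
            (fun a ha => le_trans (hrx a ha) hxy)
      · -- z < val: new triple (y, z, val), seen becomes val :: z :: y :: x :: rest
        have hB : pvStepB (z :: y :: x :: rest, res) val
            = (val :: z :: y :: x :: rest, res ++ [val * z * y]) := by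
          simp [pvStepB, pvInsertDesc, hvz, show ¬ val ≤ y by omega,
            show ¬ val ≤ x by omega, List.getD]
        rw [hB, if_neg (by omega)]
        simp only [List.getD, List.getElem?_cons_zero, List.getElem?_cons_succ,
          Option.getD_some]
        rw [show y * z * val = val * z * y by ring]
        exact ih _ _ _ _ _ _ (Or.inl rfl) hyz (by omega)
          (fun a ha => le_trans (hrx a ha) hxy)
    · -- val ≤ x: heap unchanged, val sinks into rest
      have hB : pvStepB (z :: y :: x :: rest, res) val
          = (z :: y :: x :: pvInsertDesc rest val, res ++ [z * y * x]) := by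
        simp [pvStepB, pvInsertDesc, show val ≤ z by omega, show val ≤ y by omega,
          show val ≤ x by omega, List.getD]
      rw [hB]
      have hrest' : ∀ a ∈ pvInsertDesc rest val, a ≤ x := by
        intro a ha
        rcases mem_insertDesc ha with h | h
        · omega
        · exact hrest a h
      rcases hperm with h | h <;> subst h
      · rw [show pvStepA ([x, y, z], res) val = ([x, y, z], res ++ [z * y * x]) from by
          simp only [pvStepA, List.getD, List.getElem?_cons_zero, List.getElem?_cons_succ,
            Option.getD_some, if_neg hlt]
          rw [show x * y * z = z * y * x by ring]]
        exact ih _ _ _ _ _ _ (Or.inl rfl) hxy hyz hrest'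
      · rw [show pvStepA ([x, z, y], res) val = ([x, z, y], res ++ [z * y * x]) from by
          simp only [pvStepA, List.getD, List.getElem?_cons_zero, List.getElem?_cons_succ,
            Option.getD_some, if_neg hlt]
          rw [show x * z * y = z * y * x by ring]]
        exact ih _ _ _ _ _ _ (Or.inr rfl) hxy hyz hrest'

-- the first two iterations of B's loop: seen becomes [max a b, min a b]
lemma stepB2 (a b : Int) :
    pvStepB (pvStepB ([], []) a) b = ([max a b, min a b], [-1, -1]) := by
  by_cases h : b ≤ a
  · simp [pvStepB, pvInsertDesc, h, max_eq_left h, min_eq_right h]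
  · have h' : a ≤ b := le_of_lt (not_le.mp h)
    simp [pvStepB, pvInsertDesc, h, max_eq_right h', min_eq_left h']

-- A's first two pushes build the same pair, min first
lemma pushA2 (a b : Int) :
    pvHeappush (pvHeappush [] a) b = [min a b, max a b] := by
  rw [push0, push1]
  split_ifs with h
  · rw [min_eq_right (le_of_lt h), max_eq_left (le_of_lt h)]
  · rw [min_eq_left (not_lt.mp h), max_eq_right (not_lt.mp h)]

theorem findMaxProduct_spec : Claim_equal_findMaxProduct := by
  intro arr _
  unfold Spec_findMaxProduct
  rcases arr with _ | ⟨a, arr⟩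
  · rfl
  rcases arr with _ | ⟨b, arr⟩
  · rfl
  rcases arr with _ | ⟨c, l⟩
  · simp only [findMaxProduct, findMaxProduct_alt, List.foldl]
    rw [stepB2]
    simp [pvStepB, pvInsertDesc]
  · -- arr = a :: b :: c :: l
    simp only [findMaxProduct, findMaxProduct_alt, List.foldl, List.length_cons,
      List.getD, List.getElem?_cons_zero, List.getElem?_cons_succ, Option.getD_some,
      List.drop_succ_cons, List.drop_zero]
    rw [if_neg (by omega), stepB2, pushA2]
    set m := min a b with hm
    set M := max a b with hM
    have hmM : m ≤ M := min_le_max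
    have hprod : m * M = a * b := min_mul_max a b
    by_cases hcM : c ≤ M
    · by_cases hcm : c ≤ m
      · -- c is smallest: s3 = [M, m, c]
        have hB3 : pvStepB ([M, m], [-1, -1]) c = ([M, m, c], [-1, -1, M * m * c]) := by
          simp [pvStepB, pvInsertDesc, hcM, hcm, List.getD]
        rw [hB3]
        by_cases hl : l = []
        · subst hl
          rw [if_pos (by simp)]
          simp only [List.foldl]
          have : a * b * c = M * m * c := by linear_combination (-c) * hprod
          rw [this]
        · rw [if_neg (by simp [hl, List.length_eq_zero_iff]), push2]
          by_cases hcm' : c < m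
          · rw [if_pos hcm']
            simp only [List.getD, List.getElem?_cons_zero, List.getElem?_cons_succ,
              Option.getD_some]
            rw [show c * M * m = M * m * c by ring]
            exact fold_eq l _ c m M [] _ (Or.inr rfl) hcm hmM (by simp)
          · have hce : c = m := by omega
            rw [if_neg hcm']
            simp only [List.getD, List.getElem?_cons_zero, List.getElem?_cons_succ,
              Option.getD_some]
            rw [show m * M * c = M * m * c by ring, hce]
            exact fold_eq l [m, M, m] m m M [] _ (Or.inr rfl) le_rfl hmM (by simp)
      · -- m < c ≤ M: s3 = [M, c, m]
        have hB3 : pvStepB ([M, m], [-1, -1]) c = ([M, c, m], [-1, -1, M * c * m]) := by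
          simp [pvStepB, pvInsertDesc, hcM, hcm, List.getD]
        rw [hB3]
        by_cases hl : l = []
        · subst hl
          rw [if_pos (by simp)]
          simp only [List.foldl]
          have : a * b * c = M * c * m := by linear_combination (-c) * hprod
          rw [this]
        · rw [if_neg (by simp [hl, List.length_eq_zero_iff]), push2,
            if_neg (by omega)]
          simp only [List.getD, List.getElem?_cons_zero, List.getElem?_cons_succ,
            Option.getD_some]
          rw [show m * M * c = M * c * m by ring]
          exact fold_eq l _ m c M [] _ (Or.inr rfl) (by omega) hcM (by simp)
    · -- M < c: s3 = [c, M, m]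
      have hB3 : pvStepB ([M, m], [-1, -1]) c = ([c, M, m], [-1, -1, c * M * m]) := by
        simp [pvStepB, pvInsertDesc, hcM, List.getD]
      rw [hB3]
      by_cases hl : l = []
      · subst hl
        rw [if_pos (by simp)]
        simp only [List.foldl]
        have : a * b * c = c * M * m := by linear_combination (-c) * hprod
        rw [this]
      · rw [if_neg (by simp [hl, List.length_eq_zero_iff]), push2,
          if_neg (by omega)]
        simp only [List.getD, List.getElem?_cons_zero, List.getElem?_cons_succ,
          Option.getD_some]
        rw [show m * M * c = c * M * m by ring]
        exact fold_eq l _ m M c [] _ (Or.inl rfl) hmM (by omega) (by simp)
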